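-- pv_equiv track=rewrite | github.com/YevhenKhomenko/advanced_python_course | parsers/arithmetic_parser.py | _modify_operators
-- ===== SOURCE A (Python) =====
-- def _modify_operators(tokens):
--     """
--     Checks if token list contains '*','*' and '/','/', and if so,
--     joins them. I.e., ['2','*','*','2'] => ['2','**','2']
--     """
--     prev_token = ''
--     final_token_list = []
--     for token in tokens:
--         if token in '*/':
--             if len(prev_token) < 3:
--                 prev_token += token
--             else:
--                 raise SyntaxError('Wrong operator usage.')
--
--         elif prev_token:
--             final_token_list.append(prev_token)
--             prev_token = ''
--             final_token_list.append(token)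
--
--         else:
--             final_token_list.append(token)
--
--     return final_token_list
-- ===== SOURCE B (Python) =====
-- from itertools import groupby
--
-- def _modify_operators(tokens):
--     """Groupby-based reimplementation: split tokens into maximal runs of
--     operator-like tokens (t in '*/') and runs of other tokens; fold each
--     operator run into one merged token held in `pending`, flush it when a
--     non-operator run follows (a trailing operator run is never emitted)."""
--     result = []
--     pending = ''
--     for is_op, group in groupby(tokens, key=lambda t: t in '*/'):
--         if is_op:
--             s = ''
--             for token in group:
--                 if len(s) < 3:
--                     s += token
--                 else:
--                     raise SyntaxError('Wrong operator usage.')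
--             pending = s
--         else:
--             if pending:
--                 result.append(pending)
--                 pending = ''
--             result.extend(group)
--     return result
-- ===== Notes on version B (the rewrite author's own statement) =====
-- stated objective: alternative
-- what changed: B replaces A's single stateful loop (prev_token carried across iterations) by an itertools.groupby decomposition into maximal operator/non-operator runs: each operator run is folded into one merged token held in a pending slot, flushed when a non-operator run follows; a trailing operator run is never emitted, as in A.
import Mathlib
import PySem

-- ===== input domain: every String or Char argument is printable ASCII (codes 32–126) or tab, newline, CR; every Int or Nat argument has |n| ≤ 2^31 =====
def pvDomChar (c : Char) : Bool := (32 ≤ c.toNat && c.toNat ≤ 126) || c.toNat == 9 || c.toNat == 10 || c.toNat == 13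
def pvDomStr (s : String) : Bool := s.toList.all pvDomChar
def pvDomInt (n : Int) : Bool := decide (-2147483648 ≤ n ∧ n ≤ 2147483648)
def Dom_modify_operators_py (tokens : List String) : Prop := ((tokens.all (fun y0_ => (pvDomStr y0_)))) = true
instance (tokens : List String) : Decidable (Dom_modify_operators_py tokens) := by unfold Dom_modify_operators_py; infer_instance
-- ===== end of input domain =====

-- B replaces A's single stateful loop by a groupby-style decomposition into maximal operator/non-operator runs (alternative; not faster).

-- `token in '*/'` (Python substring membership)
def pvIsOp (t : String) : Bool := PySem.Str.isIn t "*/"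

-- ===== PORT A =====
-- the loop of A: state = (prev_token as List Char, final_token_list reversed)
def pvGoA : List String → List Char → List String → List String
  | [], _prev, acc => acc.reverse
  | t :: ts, prev, acc =>
    if pvIsOp t then
      if prev.length < 3 then pvGoA ts (prev ++ t.toList) acc
      else acc.reverse  -- raise SyntaxError('Wrong operator usage.'): excluded by Pre_
    else if prev ≠ [] then pvGoA ts [] (t :: String.ofList prev :: acc)
    else pvGoA ts prev (t :: acc)

def modify_operators_py (tokens : List String) : List String := pvGoA tokens [] []

-- ===== PORT B =====
-- itertools.groupby(tokens, key=pvIsOp): maximal runs of equal key, in order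
def pvChunks : List String → List (List String)
  | [] => []
  | t :: ts =>
    (t :: ts.takeWhile (fun u => pvIsOp u == pvIsOp t)) ::
      pvChunks (ts.dropWhile (fun u => pvIsOp u == pvIsOp t))
termination_by l => l.length
decreasing_by simp only [List.length_cons]; exact Nat.lt_succ_of_le (ts.length_dropWhile_le _)

-- B's inner fold over an operator run (the else branch is Python B's raise: excluded by Pre_)
def pvFoldOps (g : List String) : List Char :=
  g.foldl (fun s t => if s.length < 3 then s ++ t.toList else s) []

def pvGoB : List (List String) → List Char → List String
  | [], _pending => []            -- a trailing pending operator run is never emitted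
  | g :: gs, pending =>
    match g with
    | [] => pvGoB gs pending       -- groupby never yields an empty group
    | t :: _ =>
      if pvIsOp t then pvGoB gs (pvFoldOps g)
      else (if pending.isEmpty then [] else [String.ofList pending]) ++ g ++ pvGoB gs []

def modify_operators_py_alt (tokens : List String) : List String :=
  pvGoB (pvChunks tokens) []

-- ===== PRECONDITION & SPEC =====
-- Pre_ excludes exactly the inputs on which A raises SyntaxError: a contiguous block of
-- operator-like tokens whose combined length, excluding the block's last token, reaches 3.
def Pre_modify_operators_py (tokens : List String) : Prop :=
  ∀ j ≤ tokens.length, ∀ i ≤ j,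
    (∀ k < j, i ≤ k → pvIsOp (tokens.getD k "") = true) →
    (((tokens.drop i).take (j - i - 1)).map (fun s => s.toList.length)).sum < 3
instance (tokens : List String) : Decidable (Pre_modify_operators_py tokens) := by
  unfold Pre_modify_operators_py; infer_instance

def pvWitness_modify_operators_py : List String := ["2", "*", "*", "2"]

def Spec_modify_operators_py (tokens : List String) (out : List String) : Prop := out = modify_operators_py_alt tokens
instance (tokens : List String) (out : List String) : Decidable (Spec_modify_operators_py tokens out) := by unfold Spec_modify_operators_py; infer_instance

-- ===== CLAIM (what is proved, stated in full; the proofs are below) =====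
def Claim_equal_modify_operators_py : Prop := ∀ (tokens : List String), Dom_modify_operators_py tokens → Pre_modify_operators_py tokens → Spec_modify_operators_py tokens (modify_operators_py tokens)

-- ===== LEMMAS AND PROOFS =====

-- unfolding lemmas for pvGoB on a nonempty group
lemma pvGoB_op (t : String) (g' : List String) (gs : List (List String)) (pending : List Char)
    (h : pvIsOp t = true) :
    pvGoB ((t :: g') :: gs) pending = pvGoB gs (pvFoldOps (t :: g')) := by
  simp [pvGoB, h]

lemma pvGoB_nonop (t : String) (g' : List String) (gs : List (List String)) (pending : List Char)
    (h : pvIsOp t = false) :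
    pvGoB ((t :: g') :: gs) pending
      = (if pending.isEmpty then [] else [String.ofList pending]) ++ (t :: g') ++ pvGoB gs [] := by
  simp [pvGoB, h]

-- B's fold over an operator run concatenates when no length check fails
lemma pvFold_concat (g : List String) : ∀ (prev : List Char),
    prev.length + ((g.dropLast).map (fun s => s.toList.length)).sum < 3 →
    g.foldl (fun s t => if s.length < 3 then s ++ t.toList else s) prev
      = prev ++ (g.map String.toList).flatten := by
  induction g with
  | nil => intro prev _; simp
  | cons t g' ih =>
    intro prev h
    cases g' with
    | nil =>
      have h1 : prev.length < 3 := by simpa using h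
      rw [List.foldl_cons, if_pos h1]; simp
    | cons u g'' =>
      simp only [List.dropLast_cons₂, List.map_cons, List.sum_cons] at h
      have h1 : prev.length < 3 := by omega
      rw [List.foldl_cons, if_pos h1,
        ih (prev ++ t.toList) (by simp only [List.length_append]; omega)]
      simp

lemma pvFoldOps_eq (g : List String)
    (h : ((g.dropLast).map (fun s => s.toList.length)).sum < 3) :
    pvFoldOps g = (g.map String.toList).flatten := by
  have := pvFold_concat g []
    (by simpa only [List.length_nil, Nat.zero_add] using h)
  simpa [pvFoldOps] using this

-- A's loop over an operator run folds it into prev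
lemma pvGoA_op_run (g : List String) : ∀ (ts : List String) (prev : List Char) (acc : List String),
    (∀ t ∈ g, pvIsOp t = true) →
    prev.length + ((g.dropLast).map (fun s => s.toList.length)).sum < 3 →
    pvGoA (g ++ ts) prev acc = pvGoA ts (prev ++ (g.map String.toList).flatten) acc := by
  induction g with
  | nil => intro ts prev acc _ _; simp
  | cons t g' ih =>
    intro ts prev acc hop h
    cases g' with
    | nil =>
      have h1 : prev.length < 3 := by simpa using h
      simp [pvGoA, hop t (by simp), h1]
    | cons u g'' =>
      simp only [List.dropLast_cons₂, List.map_cons, List.sum_cons] at h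
      have h1 : prev.length < 3 := by omega
      have step : pvGoA ((t :: u :: g'') ++ ts) prev acc
          = pvGoA ((u :: g'') ++ ts) (prev ++ t.toList) acc := by
        simp [pvGoA, hop t (by simp), h1]
      rw [step, ih ts (prev ++ t.toList) acc
        (fun x hx => hop x (List.mem_cons_of_mem _ hx))
        (by simp only [List.length_append]; omega)]
      simp

-- A's loop over a non-operator run with empty prev just appends
lemma pvGoA_nonop_nil (g : List String) : ∀ (ts acc : List String),
    (∀ t ∈ g, pvIsOp t = false) →
    pvGoA (g ++ ts) [] acc = pvGoA ts [] (g.reverse ++ acc) := by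
  induction g with
  | nil => intro ts acc _; simp
  | cons t g' ih =>
    intro ts acc hno
    have step : pvGoA ((t :: g') ++ ts) [] acc = pvGoA (g' ++ ts) [] (t :: acc) := by
      simp [pvGoA, hno t (by simp)]
    rw [step, ih ts (t :: acc) (fun x hx => hno x (List.mem_cons_of_mem _ hx))]
    simp

-- A's loop over a non-operator run: flush prev, then append the run
lemma pvGoA_nonop_run (g ts : List String) (prev : List Char) (acc : List String)
    (hno : ∀ t ∈ g, pvIsOp t = false) (hne : g ≠ []) :
    pvGoA (g ++ ts) prev acc
      = pvGoA ts [] (g.reverse ++ (if prev.isEmpty then acc else String.ofList prev :: acc)) := by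
  cases g with
  | nil => exact absurd rfl hne
  | cons t g' =>
    by_cases hp : prev = []
    · subst hp
      rw [pvGoA_nonop_nil _ _ _ hno]
      simp
    · have step : pvGoA ((t :: g') ++ ts) prev acc
          = pvGoA (g' ++ ts) [] (t :: String.ofList prev :: acc) := by
        simp [pvGoA, hno t (by simp), hp]
      rw [step, pvGoA_nonop_nil _ _ _ (fun x hx => hno x (List.mem_cons_of_mem _ hx))]
      simp [List.isEmpty_iff, hp]

lemma pvTakeWhile_key {t : String} {ts : List String} {u : String}
    (hu : u ∈ ts.takeWhile (fun u => pvIsOp u == pvIsOp t)) : pvIsOp u = pvIsOp t := by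
  have := List.mem_takeWhile_imp hu
  simpa using this

lemma pvDropWhile_head {α : Type} (p : α → Bool) : ∀ (ts : List α) (r : α) (rs : List α),
    ts.dropWhile p = r :: rs → p r = false := by
  intro ts
  induction ts with
  | nil => intro r rs h; simp [List.dropWhile] at h
  | cons a ts' ih =>
    intro r rs h
    rw [List.dropWhile_cons] at h
    by_cases hpa : p a = true
    · rw [if_pos hpa] at h; exact ih r rs h
    · rw [if_neg hpa] at h
      cases h
      simpa using hpa

-- getD on the left part of an append
lemma pvGetD_append_left (l1 l2 : List String) (k : Nat) (d : String) (h : k < l1.length) :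
    (l1 ++ l2).getD k d = l1.getD k d := by
  simp [List.getD, List.getElem?_append_left h]

-- getD through drop
lemma pvGetD_drop (l : List String) (m n : Nat) (d : String) :
    (l.drop m).getD n d = l.getD (m + n) d := by
  simp [List.getD, List.getElem?_drop]

-- Pre_ is inherited by suffixes
lemma pvPre_drop (ts : List String) (m : Nat) (h : Pre_modify_operators_py ts) :
    Pre_modify_operators_py (ts.drop m) := by
  intro j hj i hi hall
  rcases Nat.eq_zero_or_pos (j - i - 1) with h0 | hpos
  · simp [h0]
  · have hlen : (ts.drop m).length = ts.length - m := by simp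
    rw [hlen] at hj
    have hall' : ∀ k < j + m, i + m ≤ k → pvIsOp (ts.getD k "") = true := by
      intro k hk hik
      have := hall (k - m) (by omega) (by omega)
      rw [pvGetD_drop] at this
      rwa [show m + (k - m) = k by omega] at this
    have h2 := h (j + m) (by omega) (i + m) (by omega) hall'
    rw [show j + m - (i + m) - 1 = j - i - 1 by omega] at h2
    rw [List.drop_drop, Nat.add_comm m i]
    exact h2

-- the head operator chunk satisfies the length bound (it is a prefix of the list)
lemma pvPre_head_op (t : String) (ts : List String)
    (h : Pre_modify_operators_py (t :: ts))
    (hallop : ∀ u ∈ t :: ts.takeWhile (fun u => pvIsOp u == pvIsOp t), pvIsOp u = true) :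
    (((t :: ts.takeWhile (fun u => pvIsOp u == pvIsOp t)).dropLast).map
      (fun s => s.toList.length)).sum < 3 := by
  set g := t :: ts.takeWhile (fun u => pvIsOp u == pvIsOp t) with hg
  have hsplit : t :: ts = g ++ ts.dropWhile (fun u => pvIsOp u == pvIsOp t) := by
    rw [hg]; simp
  have hlen : g.length ≤ (t :: ts).length := by
    rw [hg]
    simp only [List.length_cons, Nat.succ_le_succ_iff]
    exact (List.takeWhile_sublist _).length_le
  have hall : ∀ k < g.length, 0 ≤ k → pvIsOp ((t :: ts).getD k "") = true := by
    intro k hk _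
    rw [hsplit, pvGetD_append_left _ _ _ _ hk, List.getD_eq_getElem _ _ hk]
    exact hallop _ (List.getElem_mem hk)
  have h2 := h g.length hlen 0 (Nat.zero_le _) hall
  rw [hsplit] at h2
  simp only [List.drop_zero, Nat.sub_zero] at h2
  rw [List.take_append, show g.length - 1 - g.length = 0 by omega, List.take_zero,
    List.append_nil, ← List.dropLast_eq_take] at h2
  exact h2

-- the main invariant: A's loop equals B's group processing on the remaining chunks
lemma pvMain (ts : List String) : ∀ (pending : List Char) (acc : List String),
    Pre_modify_operators_py ts →
    (∀ r rs, ts = r :: rs → pvIsOp r = true → pending = []) →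
    pvGoA ts pending acc = acc.reverse ++ pvGoB (pvChunks ts) pending := by
  induction ts using pvChunks.induct with
  | case1 => intro pending acc _ _; simp [pvGoA, pvChunks, pvGoB]
  | case2 t ts ih =>
    intro pending acc hpre hhead
    have hsplit : t :: ts
        = (t :: ts.takeWhile (fun u => pvIsOp u == pvIsOp t))
          ++ ts.dropWhile (fun u => pvIsOp u == pvIsOp t) := by
      simp
    have hchunks : pvChunks (t :: ts)
        = (t :: ts.takeWhile (fun u => pvIsOp u == pvIsOp t))
          :: pvChunks (ts.dropWhile (fun u => pvIsOp u == pvIsOp t)) := by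
      rw [pvChunks]
    have hrest : ts.dropWhile (fun u => pvIsOp u == pvIsOp t)
        = (t :: ts).drop (t :: ts.takeWhile (fun u => pvIsOp u == pvIsOp t)).length := by
      conv_rhs => rw [hsplit]
      rw [List.drop_left]
    have hpre' : Pre_modify_operators_py (ts.dropWhile (fun u => pvIsOp u == pvIsOp t)) := by
      rw [hrest]; exact pvPre_drop _ _ hpre
    by_cases hop : pvIsOp t = true
    · have hpend : pending = [] := hhead t ts rfl hop
      subst hpend
      have hallop : ∀ u ∈ t :: ts.takeWhile (fun u => pvIsOp u == pvIsOp t),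
          pvIsOp u = true := by
        intro u hu
        rcases List.mem_cons.1 hu with h | h
        · subst h; exact hop
        · rw [pvTakeWhile_key h, hop]
      have hsum := pvPre_head_op t ts hpre hallop
      have hhead' : ∀ r rs, ts.dropWhile (fun u => pvIsOp u == pvIsOp t) = r :: rs →
          pvIsOp r = true →
          ([] : List Char) ++ ((t :: ts.takeWhile (fun u => pvIsOp u == pvIsOp t)).map
            String.toList).flatten = [] := by
        intro r rs hr hrop
        have := pvDropWhile_head _ ts r rs hr
        rw [hrop, hop] at this
        simp at this
      conv_lhs => rw [hsplit]
      rw [pvGoA_op_run _ _ _ _ hallop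
        (by simpa only [List.length_nil, Nat.zero_add] using hsum)]
      rw [ih ([] ++ ((t :: ts.takeWhile (fun u => pvIsOp u == pvIsOp t)).map
            String.toList).flatten) acc hpre' hhead']
      rw [hchunks, pvGoB_op _ _ _ _ hop, pvFoldOps_eq _ hsum]
      simp
    · have hopf : pvIsOp t = false := by simpa using hop
      have hno : ∀ u ∈ t :: ts.takeWhile (fun u => pvIsOp u == pvIsOp t),
          pvIsOp u = false := by
        intro u hu
        rcases List.mem_cons.1 hu with h | h
        · subst h; exact hopf
        · rw [pvTakeWhile_key h, hopf]
      conv_lhs => rw [hsplit]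
      rw [pvGoA_nonop_run _ _ _ _ hno (by simp)]
      rw [ih [] _ hpre' (fun _ _ _ _ => rfl)]
      rw [hchunks, pvGoB_nonop _ _ _ _ hopf]
      by_cases hp : pending = []
      · subst hp; simp
      · rw [if_neg (by simpa [List.isEmpty_iff] using hp)]
        rw [if_neg (by simpa [List.isEmpty_iff] using hp)]
        simp

-- ===== VERDICT (by name: the statement is the Claim_ definition above) =====
theorem modify_operators_py_spec : Claim_equal_modify_operators_py := by
  intro tokens _hdom hpre
  unfold Spec_modify_operators_py modify_operators_py modify_operators_py_alt
  rw [pvMain tokens [] [] hpre (fun _ _ _ _ => rfl)]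
  simp
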